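-- pv_equiv track=rewrite | github.com/Ezra-Alexander/sample_work | general_datafinder.py | labels_2_alphabet
-- ===== SOURCE A (Python) =====
-- def labels_2_alphabet(label_set,labels):
--
-- 	indices=[]
-- 	for label in label_set:
-- 		if (labels.index(label)+1) not in indices:
-- 			indices.append(labels.index(label)+1)
--
-- 	indices = sorted(indices)
--
-- 	code=""
-- 	previous=-1
-- 	first=True
-- 	for i,index in enumerate(indices):
-- 	 	if first:
-- 	 		first=False
-- 	 		previous=index
-- 	 		code+=int_to_excel(index)
-- 	 		code+=":"
-- 	 	else:
-- 	 		if index == (previous+1):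
-- 	 			previous=index
-- 	 		else:
-- 	 			code+=int_to_excel(previous)
-- 	 			code+="::"
-- 	 			code+=int_to_excel(index)
-- 	 			code+=":"
-- 	 			previous=index
--
-- 	 	if i+1 == len(indices):
-- 	 				code+=int_to_excel(index)
-- 	return code
--
-- def int_to_excel(number):
--
-- 	if number<1:
-- 		raise Exception("Must be positive integer")
--
-- 	alphabet="ABCDEFGHIJKLMNOPQRSTUVWXYZ"
--
-- 	result=""
--
-- 	while number>0:
--
-- 		number = number - 1
--
-- 		remainder = number % 26
--
-- 		result+=chr(65+remainder)
--
-- 		number = number // 26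
--
-- 	return result[::-1]
-- ===== SOURCE B (Python) =====
-- def int_to_excel(number):
--     if number < 1:
--         raise Exception("Must be positive integer")
--     q, r = divmod(number - 1, 26)
--     return (int_to_excel(q) if q else "") + chr(65 + r)
--
-- def labels_2_alphabet(label_set, labels):
--     indices = sorted(set(labels.index(label) + 1 for label in label_set))
--     runs = []
--     cur = None
--     for i in indices:
--         if cur is not None and i == cur[1] + 1:
--             cur = (cur[0], i)
--         else:
--             if cur is not None:
--                 runs.append(cur)
--             cur = (i, i)
--     if cur is not None:
--         runs.append(cur)
--     return "::".join(int_to_excel(s) + ":" + int_to_excel(e) for s, e in runs)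
-- ===== Notes on version B (the rewrite author's own statement) =====
-- stated objective: simpler
-- what changed: A's single stateful formatting loop over enumerate(indices) with first/previous flags and an in-loop last-element check is replaced by a two-phase decomposition (group sorted unique indices into maximal consecutive runs, then '::'.join the formatted start:end runs), the dedup-during-append first loop by sorted(set(...)), and the iterative reverse-and-flip int_to_excel by a direct recursive divmod formulation.
import Mathlib
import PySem

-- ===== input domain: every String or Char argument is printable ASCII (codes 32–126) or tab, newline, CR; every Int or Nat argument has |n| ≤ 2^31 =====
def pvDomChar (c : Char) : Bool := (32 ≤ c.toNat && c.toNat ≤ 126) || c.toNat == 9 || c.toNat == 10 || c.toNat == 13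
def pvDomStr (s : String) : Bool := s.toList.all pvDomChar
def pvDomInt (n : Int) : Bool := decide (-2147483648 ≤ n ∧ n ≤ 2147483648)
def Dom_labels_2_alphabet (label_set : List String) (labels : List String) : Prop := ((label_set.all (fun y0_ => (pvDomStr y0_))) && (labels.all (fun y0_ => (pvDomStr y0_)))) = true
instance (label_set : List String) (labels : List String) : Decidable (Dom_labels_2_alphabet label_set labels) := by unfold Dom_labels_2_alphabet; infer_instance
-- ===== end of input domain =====

-- B replaces A's single stateful formatting loop (enumerate + first/previous flags) by a
-- two-phase decomposition — group the sorted unique 1-based indices into maximal runs, then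
-- join the formatted runs with '::' — and a recursive base-26 int_to_excel; objective: simpler.


-- ===== PORT A =====
-- int_to_excel's while loop (A builds `result` forwards, then reverses it);
-- strings are carried as List Char (Lean's String.append is kernel-opaque).
def intToExcelGo (n : Nat) (result : List Char) : List Char :=
  if h : n = 0 then result
  else intToExcelGo ((n - 1) / 26) (result ++ [Char.ofNat (65 + (n - 1) % 26)])
termination_by n
decreasing_by exact Nat.lt_of_le_of_lt (Nat.div_le_self _ _) (by omega)

-- A raises for number < 1; labels_2_alphabet only calls it with number ≥ 1 (index+1).
def intToExcel (number : Int) : List Char :=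
  (intToExcelGo number.toNat []).reverse

-- the loop body of A's second (formatting) loop, n = len(indices)
def l2aStep (n : Nat) (st : List Char × Int × Bool) (p : Int × Int) : List Char × Int × Bool :=
  let code := st.1; let previous := st.2.1; let first := st.2.2
  let i := p.1; let index := p.2
  let st' :=
    if first then (code ++ intToExcel index ++ [':'], index, false)
    else if index = previous + 1 then (code, index, first)
    else (code ++ intToExcel previous ++ [':', ':'] ++ intToExcel index ++ [':'], index, first)
  if i + 1 = (n : Int) then (st'.1 ++ intToExcel index, st'.2.1, st'.2.2) else st'

def labels_2_alphabet (label_set : List String) (labels : List String) : String :=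
  -- first loop: dedup-preserving append of labels.index(label)+1 (none = ValueError, excluded by Pre_)
  let indices : List Int := label_set.foldl (fun indices label =>
    match PySem.List.index? labels label with
    | some j => if ((j : Int) + 1) ∈ indices then indices else indices ++ [(j : Int) + 1]
    | none => indices) []
  let indices := PySem.List.sorted indices (fun x => x) false
  -- second loop: for i, index in enumerate(indices)
  let st := (PySem.List.enumerate indices 0).foldl (l2aStep indices.length) ([], -1, true)
  String.mk st.1

-- ===== PORT B =====
-- recursive int_to_excel: divmod(number-1, 26), prepend the recursive part
def intToExcelAlt (number : Int) : List Char :=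
  if h : number < 1 then []   -- Source B raises here; never reached from labels_2_alphabet_alt
  else
    let q := PySem.Int.floordiv (number - 1) 26
    let r := PySem.Int.mod (number - 1) 26
    (if q ≠ 0 then intToExcelAlt q else []) ++ [Char.ofNat (65 + r.toNat)]
termination_by number.toNat
decreasing_by
  have h1 : (0:Int) ≤ number - 1 := by omega
  have : PySem.Int.floordiv (number - 1) 26 = (number - 1) / 26 :=
    PySem.Int.floordiv_eq_ediv_of_pos (by omega)
  simp only [this]
  have h2 : (0:Int) ≤ (number - 1) / 26 := Int.ediv_nonneg h1 (by omega)
  have h3 : (number - 1) / 26 ≤ number - 1 := Int.ediv_le_self _ h1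
  omega

def l2aAltStep (st : List (Int × Int) × Option (Int × Int)) (i : Int) : List (Int × Int) × Option (Int × Int) :=
  match st.2 with
  | some c => if i = c.2 + 1 then (st.1, some (c.1, i))
              else (st.1 ++ [c], some (i, i))
  | none => (st.1, some (i, i))

def labels_2_alphabet_alt (label_set : List String) (labels : List String) : String :=
  let vals : List Int := label_set.foldl (fun acc label =>
    match PySem.List.index? labels label with
    | some j => acc ++ [(j : Int) + 1]
    | none => acc) []   -- none = ValueError, excluded by Pre_
  let indices := PySem.List.sorted (PySem.Set.ofList vals) (fun x => x) false
  let st := indices.foldl l2aAltStep ([], none)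
  let runs := st.1 ++ (match st.2 with | some c => [c] | none => [])
  String.mk (PySem.Chars.join [':', ':']
    (runs.map (fun r => intToExcelAlt r.1 ++ [':'] ++ intToExcelAlt r.2)))

-- ===== PRECONDITION & SPEC =====
-- Pre_ excludes exactly the inputs on which labels.index(label) raises ValueError
-- (some label of label_set missing from labels); Python B raises there as well.
def Pre_labels_2_alphabet (label_set : List String) (labels : List String) : Prop :=
  ∀ l ∈ label_set, l ∈ labels
instance (label_set : List String) (labels : List String) : Decidable (Pre_labels_2_alphabet label_set labels) := by unfold Pre_labels_2_alphabet; infer_instance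

def pvWitness_labels_2_alphabet : List String × List String :=
  (["c", "a", "d"], ["a", "b", "c", "d"])

def Spec_labels_2_alphabet (label_set : List String) (labels : List String) (out : String) : Prop := out = labels_2_alphabet_alt label_set labels
instance (label_set : List String) (labels : List String) (out : String) : Decidable (Spec_labels_2_alphabet label_set labels out) := by unfold Spec_labels_2_alphabet; infer_instance

-- ===== CLAIM (what is proved, stated in full; the proofs are below) =====
def Claim_equal_labels_2_alphabet : Prop := ∀ (label_set : List String) (labels : List String), Dom_labels_2_alphabet label_set labels → Pre_labels_2_alphabet label_set labels → Spec_labels_2_alphabet label_set labels (labels_2_alphabet label_set labels)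

-- ===== LEMMAS AND PROOFS =====

theorem intToExcelAlt_zero : intToExcelAlt 0 = [] := by
  rw [intToExcelAlt]; simp

theorem intToExcelGo_eq (n : Nat) : ∀ acc, intToExcelGo n acc = acc ++ (intToExcelAlt (n : Int)).reverse := by
  induction n using Nat.strong_induction_on with
  | _ n ih =>
    intro acc
    by_cases h : n = 0
    · subst h
      rw [intToExcelGo, intToExcelAlt]
      simp
    · rw [intToExcelGo]
      simp only [h, dite_false]
      rw [ih ((n - 1) / 26) (Nat.lt_of_le_of_lt (Nat.div_le_self _ _) (by omega)) _]
      conv_rhs => rw [intToExcelAlt]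
      have hn1 : ((n : Int)) - 1 = (((n - 1 : Nat) : Int)) := by omega
      have hq : PySem.Int.floordiv ((n : Int) - 1) 26 = (((n - 1) / 26 : Nat) : Int) := by
        rw [hn1]; exact_mod_cast PySem.Int.floordiv_natCast (n - 1) 26
      have hr : PySem.Int.mod ((n : Int) - 1) 26 = (((n - 1) % 26 : Nat) : Int) := by
        rw [hn1]; exact_mod_cast PySem.Int.mod_natCast (n - 1) 26
      have hlt : ¬ ((n : Int) < 1) := by omega
      simp only [hlt, dite_false, hq, hr]
      by_cases hq0 : (((n - 1) / 26 : Nat) : Int) = 0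
      · simp [hq0, intToExcelAlt_zero]
        congr 1
      · simp only [hq0, ne_eq, not_false_eq_true, if_true]
        simp [List.reverse_append]
        congr 1
theorem intToExcel_eq (number : Int) : intToExcel number = intToExcelAlt number := by
  unfold intToExcel
  rw [intToExcelGo_eq, List.nil_append, List.reverse_reverse]
  by_cases h : number < 1
  · have h0 : ((number.toNat : Nat) : Int) = 0 := by omega
    rw [h0, intToExcelAlt_zero]
    rw [intToExcelAlt]
    simp [h]
  · congr 1
    omega

-- recursive characterisation of A's formatting loop for non-first iterations
def recA (prev : Int) : List Int → List Char
  | [] => []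
  | x :: xs =>
    (if x = prev + 1 then [] else intToExcel prev ++ [':', ':'] ++ intToExcel x ++ [':'])
    ++ (if xs = [] then intToExcel x else []) ++ recA x xs

-- recursive characterisation of B's run-grouping loop
def goRuns (s p : Int) : List Int → List (Int × Int)
  | [] => [(s, p)]
  | y :: ys => if y = p + 1 then goRuns s y ys else (s, p) :: goRuns y y ys

theorem loopA (n : Nat) (l : List Int) : ∀ (k : Int) (code : List Char) (prev : Int),
    k + l.length = (n : Int) →
    ((PySem.List.enumerate l k).foldl (l2aStep n) (code, prev, false)).1 = code ++ recA prev l := by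
  induction l with
  | nil => intro k code prev h; simp [PySem.List.enumerate_nil, recA]
  | cons x xs ih =>
    intro k code prev h
    rw [PySem.List.enumerate_cons, List.foldl_cons]
    by_cases hxs : xs = []
    · subst hxs
      have hk : k + 1 = (n : Int) := by simpa using h
      simp only [PySem.List.enumerate_nil, List.foldl_nil, l2aStep, hk, recA]
      by_cases hx : x = prev + 1 <;> simp [hx, List.append_assoc]
    · have hk : ¬ (k + 1 = (n : Int)) := by
        simp only [List.length_cons] at h
        have : 0 < xs.length := List.length_pos_iff.mpr hxs
        omega
      have step : l2aStep n (code, prev, false) (k, x)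
          = ((if x = prev + 1 then code
              else code ++ intToExcel prev ++ [':', ':'] ++ intToExcel x ++ [':']), x, false) := by
        simp only [l2aStep, Bool.false_eq_true, if_false, hk]
        by_cases hx : x = prev + 1 <;> simp [hx]
      rw [step]
      have h' : (k + 1) + xs.length = (n : Int) := by
        simp only [List.length_cons] at h; omega
      rw [ih (k + 1) _ x h']
      simp only [recA, hxs]
      by_cases hx : x = prev + 1 <;> simp [hx, List.append_assoc]
def finishRuns (st : List (Int × Int) × Option (Int × Int)) : List (Int × Int) :=
  st.1 ++ (match st.2 with | some c => [c] | none => [])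

theorem loopB (l : List Int) : ∀ (runs : List (Int × Int)) (s p : Int),
    finishRuns (l.foldl l2aAltStep (runs, some (s, p))) = runs ++ goRuns s p l := by
  induction l with
  | nil => intro runs s p; simp [finishRuns, goRuns]
  | cons y ys ih =>
    intro runs s p
    rw [List.foldl_cons]
    by_cases hy : y = p + 1
    · rw [show l2aAltStep (runs, some (s, p)) y = (runs, some (s, y)) from by simp [l2aAltStep, hy]]
      rw [ih]
      simp [goRuns, hy]
    · rw [show l2aAltStep (runs, some (s, p)) y = (runs ++ [(s, p)], some (y, y)) from by simp [l2aAltStep, hy]]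
      rw [ih]
      simp [goRuns, hy]

def renderRuns (runs : List (Int × Int)) : List Char :=
  PySem.Chars.join [':', ':'] (runs.map (fun r => intToExcelAlt r.1 ++ [':'] ++ intToExcelAlt r.2))

theorem goRuns_ne_nil (s p : Int) (l : List Int) : goRuns s p l ≠ [] := by
  induction l generalizing s p with
  | nil => simp [goRuns]
  | cons y ys ih => by_cases hy : y = p + 1 <;> simp [goRuns, hy, ih]

theorem renderRuns_cons_cons (a b : Int × Int) (t : List (Int × Int)) :
    renderRuns (a :: b :: t)
      = intToExcelAlt a.1 ++ [':'] ++ intToExcelAlt a.2 ++ [':', ':'] ++ renderRuns (b :: t) := by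
  simp [renderRuns, PySem.Chars.join_cons_cons, List.append_assoc]

theorem renderRuns_goRuns (xs : List Int) : ∀ (s p : Int),
    renderRuns (goRuns s p xs)
      = intToExcel s ++ [':'] ++ (if xs = [] then intToExcel p else []) ++ recA p xs := by
  induction xs with
  | nil =>
    intro s p
    simp [renderRuns, goRuns, recA, PySem.Chars.join_singleton, intToExcel_eq, List.append_assoc]
  | cons y ys ih =>
    intro s p
    by_cases hy : y = p + 1
    · rw [show goRuns s p (y :: ys) = goRuns s y ys from by simp [goRuns, hy]]
      rw [ih]
      simp [recA, hy, List.append_assoc]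
    · rw [show goRuns s p (y :: ys) = (s, p) :: goRuns y y ys from by simp [goRuns, hy]]
      obtain ⟨r, rest, hr⟩ := List.exists_cons_of_ne_nil (goRuns_ne_nil y y ys)
      rw [hr, renderRuns_cons_cons, ← hr, ih]
      simp [recA, hy, intToExcel_eq, List.append_assoc]
def gIdx (labels : List String) (label : String) : List Int :=
  match PySem.List.index? labels label with
  | some j => [(j : Int) + 1]
  | none => []

theorem valsFold_eq (labels : List String) (ls : List String) : ∀ (acc : List Int),
    ls.foldl (fun acc label =>
      match PySem.List.index? labels label with
      | some j => acc ++ [(j : Int) + 1]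
      | none => acc) acc
    = acc ++ ls.flatMap (gIdx labels) := by
  induction ls with
  | nil => intro acc; simp
  | cons l t ih =>
    intro acc
    rw [List.foldl_cons, ih, List.flatMap_cons]
    cases h : PySem.List.index? labels l <;>
      (rw [PySem.List.index?_eq_idxOf?] at h; simp [gIdx, h, List.append_assoc])

theorem dedupFold_eq (labels : List String) (ls : List String) : ∀ (s : List Int),
    ls.foldl (fun indices label =>
      match PySem.List.index? labels label with
      | some j => if ((j : Int) + 1) ∈ indices then indices else indices ++ [(j : Int) + 1]
      | none => indices) s
    = (ls.flatMap (gIdx labels)).foldl PySem.Set.add s := by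
  induction ls with
  | nil => intro s; simp
  | cons l t ih =>
    intro s
    rw [List.foldl_cons, ih, List.flatMap_cons, List.foldl_append]
    congr 1
    cases h : PySem.List.index? labels l <;>
      (rw [PySem.List.index?_eq_idxOf?] at h; simp [gIdx, h, PySem.Set.add])

theorem format_eq (L : List Int) :
    ((PySem.List.enumerate L 0).foldl (l2aStep L.length) ([], -1, true)).1
      = renderRuns (finishRuns (L.foldl l2aAltStep ([], none))) := by
  cases L with
  | nil => simp [PySem.List.enumerate_nil, finishRuns, renderRuns, PySem.Chars.join_nil]
  | cons x xs =>
    rw [List.foldl_cons, show l2aAltStep ([], none) x = ([], some (x, x)) from rfl, loopB,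
      List.nil_append, renderRuns_goRuns]
    rw [PySem.List.enumerate_cons, List.foldl_cons]
    by_cases hxs : xs = []
    · subst hxs
      simp [l2aStep, PySem.List.enumerate_nil, recA, intToExcel_eq]
    · have hne : ¬ ((0 : Int) + 1 = ((x :: xs).length : Int)) := by
        have : 0 < xs.length := List.length_pos_iff.mpr hxs
        simp only [List.length_cons]
        omega
      have step : l2aStep (x :: xs).length ([], -1, true) (0, x)
          = (intToExcel x ++ [':'], x, false) := by
        simp [l2aStep, hxs]
      rw [step, show (0 : Int) + 1 = 1 from by norm_num,
        loopA (x :: xs).length xs 1 _ x (by simp; omega)]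
      simp [hxs, intToExcel_eq, List.append_assoc]

-- ===== VERDICT (by name: the statement is the Claim_ definition above) =====
theorem labels_2_alphabet_spec : Claim_equal_labels_2_alphabet := by
  intro label_set labels _ _
  unfold Spec_labels_2_alphabet
  simp only [labels_2_alphabet, labels_2_alphabet_alt]
  rw [dedupFold_eq, valsFold_eq, List.nil_append,
    show PySem.Set.ofList (label_set.flatMap (gIdx labels))
      = (label_set.flatMap (gIdx labels)).foldl PySem.Set.add [] from PySem.Set.ofList_eq_foldl _]
  exact congrArg String.mk (format_eq _)
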